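-- pv_equiv track=rewrite | github.com/benxiao/coins | asgn1/hammingdist.py | dumb_search
-- ===== SOURCE A (Python) =====
-- def dumb_search(source, target):
--     source_length = len(source)
--     target_length = len(target)
--     result = []
--     for i in range(source_length - target_length + 1):
--         hammingdist = 0
--         for j in range(target_length):
--             if source[i+j] != target[j]:
--                 hammingdist += 1
--
--         if hammingdist < 2:
--             result.append(i)
--     return result
-- ===== SOURCE B (Python) =====
-- def _lcp(u, v):
--     # length of the longest common prefix of u and v
--     k = 0
--     while k < len(u) and k < len(v) and u[k] == v[k]:
--         k += 1
--     return k
--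
--
-- def dumb_search(source, target):
--     m = len(target)
--     result = []
--     for i in range(len(source) - m + 1):
--         # kangaroo jump: skip the matched prefix, allow one mismatch,
--         # then the remainder must match exactly
--         k = _lcp(source[i:i + m], target)
--         if k == m or source[i + k + 1:i + m] == target[k + 1:]:
--             result.append(i)
--     return result
-- ===== Notes on version B (the rewrite author's own statement) =====
-- stated objective: faster
-- what changed: replaces the per-window mismatch-counting inner loop by a kangaroo check: scan to the first mismatch (longest common prefix), skip it, and accept iff the remainder matches via a single slice comparison, so each window ends at its first or second mismatch instead of always scanning all m positions
import Mathlib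
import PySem

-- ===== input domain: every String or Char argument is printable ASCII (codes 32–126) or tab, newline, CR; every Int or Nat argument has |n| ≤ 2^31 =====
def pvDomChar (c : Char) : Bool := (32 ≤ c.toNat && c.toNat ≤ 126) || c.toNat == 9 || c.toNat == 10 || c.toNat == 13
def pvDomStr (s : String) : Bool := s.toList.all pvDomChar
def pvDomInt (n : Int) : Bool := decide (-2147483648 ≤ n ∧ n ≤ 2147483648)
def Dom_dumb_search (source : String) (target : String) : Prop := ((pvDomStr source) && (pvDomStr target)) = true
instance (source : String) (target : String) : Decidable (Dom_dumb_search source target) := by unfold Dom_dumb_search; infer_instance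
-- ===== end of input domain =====

-- B replaces the per-window mismatch-counting loop by a kangaroo check (longest
-- common prefix, skip one mismatch, compare the remainder in one slice equality);
-- an alternative algorithm of the same worst-case cost.

-- ===== PORT A =====
def dumb_search (source : String) (target : String) : List Int :=
  let source_length : Int := PySem.Str.len source
  let target_length : Int := PySem.Str.len target
  (PySem.List.pyRange 0 (source_length - target_length + 1) 1).foldl
    (fun result i =>
      let hammingdist : Int :=
        (PySem.List.pyRange 0 target_length 1).foldl
          (fun h j =>
            if PySem.Str.pyGet? source (i + j) ≠ PySem.Str.pyGet? target j then h + 1 else h)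
          0
      if hammingdist < 2 then result ++ [i] else result)
    []

-- ===== PORT B =====
-- Source B's _lcp: 'k = 0; while k < len(u) and k < len(v) and u[k] == v[k]: k += 1; return k'
-- ported as the structural recursion consuming both lists: same comparisons in the same order.
def pvLcp : List Char → List Char → Nat
  | a :: u, b :: v => if a = b then pvLcp u v + 1 else 0
  | _, _ => 0

-- strings are sliced and compared as their lists of code points (exact for str)
def dumb_search_alt (source : String) (target : String) : List Int :=
  let s := source.toList
  let t := target.toList
  let m : Int := PySem.Str.len target
  (PySem.List.pyRange 0 (PySem.Str.len source - m + 1) 1).foldl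
    (fun result i =>
      let k : Int := (pvLcp (PySem.List.slice s (some i) (some (i + m))) t : Int)
      if k = m ∨
          PySem.List.slice s (some (i + k + 1)) (some (i + m)) =
            PySem.List.slice t (some (k + 1)) none then
        result ++ [i]
      else result)
    []

-- ===== PRECONDITION & SPEC =====
def Spec_dumb_search (source : String) (target : String) (out : List Int) : Prop := out = dumb_search_alt source target
instance (source : String) (target : String) (out : List Int) : Decidable (Spec_dumb_search source target out) := by unfold Spec_dumb_search; infer_instance

-- ===== CLAIM (what is proved, stated in full; the proofs are below) =====
def Claim_equal_dumb_search : Prop := ∀ (source : String) (target : String), Dom_dumb_search source target → Spec_dumb_search source target (dumb_search source target)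

-- ===== LEMMAS AND PROOFS =====

-- number of mismatching positions of two equal-length lists (A's hammingdist)
def pvMism : List Char → List Char → Nat
  | a :: u, b :: v => (if a = b then 0 else 1) + pvMism u v
  | _, _ => 0

theorem pvMism_nil_right (u : List Char) : pvMism u [] = 0 := by
  cases u <;> rfl

theorem pvMism_eq_zero_iff (u v : List Char) (h : u.length = v.length) :
    pvMism u v = 0 ↔ u = v := by
  induction u generalizing v with
  | nil => cases v with
    | nil => simp [pvMism]
    | cons b v => simp at h
  | cons a u ih =>
    cases v with
    | nil => simp at h
    | cons b v =>
      simp only [List.length_cons, Nat.add_right_cancel_iff] at h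
      by_cases hab : a = b <;> simp [pvMism, hab, ih v h]

-- the core equivalence: hamming distance < 2 ↔ kangaroo condition
theorem pvCore (u v : List Char) (h : u.length = v.length) :
    pvMism u v < 2 ↔
      (pvLcp u v = v.length ∨ u.drop (pvLcp u v + 1) = v.drop (pvLcp u v + 1)) := by
  induction u generalizing v with
  | nil =>
    cases v with
    | nil => simp [pvMism, pvLcp]
    | cons b v => simp at h
  | cons a u ih =>
    cases v with
    | nil => simp at h
    | cons b v =>
      simp only [List.length_cons, Nat.add_right_cancel_iff] at h
      by_cases hab : a = b
      · simpa [pvMism, pvLcp, hab] using ih v h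
      · have h0 : pvMism (a :: u) (b :: v) = 1 + pvMism u v := by simp [pvMism, hab]
        have h1 : pvLcp (a :: u) (b :: v) = 0 := by simp [pvLcp, hab]
        rw [h0, h1]
        simp only [Nat.zero_add, List.drop_succ_cons, List.drop_zero, List.length_cons]
        constructor
        · intro hlt
          exact Or.inr ((pvMism_eq_zero_iff u v h).mp (by omega))
        · rintro (habs | heq)
          · omega
          · have := (pvMism_eq_zero_iff u v h).mpr heq
            omega

-- the inner counting of A computes pvMism of the window
theorem pvInner (t s : List Char) (iN : Nat) (hle : iN + t.length ≤ s.length) :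
    (List.range t.length).countP (fun k => decide (s[iN + k]? ≠ t[k]?)) =
      pvMism ((s.drop iN).take t.length) t := by
  induction t generalizing iN with
  | nil => simp [pvMism_nil_right]
  | cons b t ih =>
    have hs : iN < s.length := by simp at hle; omega
    have hdrop : s.drop iN = s[iN] :: s.drop (iN + 1) := List.drop_eq_getElem_cons hs
    rw [List.length_cons, List.range_succ_eq_map, List.countP_cons, List.countP_map]
    have hrest : ∀ k ∈ List.range t.length,
        (((fun k => decide (s[iN + k]? ≠ (b :: t)[k]?)) ∘ Nat.succ) k = true ↔
          (fun k => decide (s[(iN + 1) + k]? ≠ t[k]?)) k = true) := by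
      intro k _
      simp [Function.comp, Nat.succ_eq_add_one, Nat.add_assoc, Nat.add_comm 1 k]
    rw [List.countP_congr hrest]
    rw [ih (iN + 1) (by simp at hle ⊢; omega)]
    rw [hdrop]
    simp only [List.take_succ_cons, pvMism]
    by_cases hb : s[iN] = b
    · simp [hb, List.getElem?_eq_getElem hs]
    · simp [hb, List.getElem?_eq_getElem hs]
      omega

-- windows: the slices of B in list form
theorem pvWindow_drop (s t : List Char) (iN kN : Nat) :
    (((s.drop iN).take t.length).drop (kN + 1)) =
      (s.drop (iN + kN + 1)).take (t.length - (kN + 1)) := by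
  rw [List.drop_take, List.drop_drop]
  congr 1

-- ===== VERDICT (by name: the statement is the Claim_ definition above) =====
theorem dumb_search_spec : Claim_equal_dumb_search := by
  intro source target _
  unfold Spec_dumb_search dumb_search dumb_search_alt
  simp only [PySem.Str.len_eq]
  apply PySem.List.foldl_congr_mem
  intro acc i hi
  rw [PySem.List.mem_pyRange_one] at hi
  obtain ⟨hi0, hiub⟩ := hi
  obtain ⟨iN, rfl⟩ : ∃ iN : Nat, i = (iN : Int) := ⟨i.toNat, (Int.toNat_of_nonneg hi0).symm⟩
  have hle : iN + target.toList.length ≤ source.toList.length := by omega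
  refine if_congr ?_ rfl rfl
  set s := source.toList with hsdef
  set t := target.toList with htdef
  set w : List Char := (s.drop iN).take t.length with hwdef
  have hwt : w.length = t.length := by rw [hwdef]; simp; omega
  -- A's side: inner fold = mismatch count of the window
  have hA : ((PySem.List.pyRange 0 (t.length : Int) 1).foldl
      (fun h j =>
        if PySem.Str.pyGet? source ((iN : Int) + j) ≠ PySem.Str.pyGet? target j then h + 1 else h)
      0) = ((pvMism w t : Nat) : Int) := by
    rw [PySem.List.foldl_ite_add_one, PySem.List.pyRange_one, List.countP_map]
    have hpt : ∀ k ∈ List.range ((t.length : Int) - 0).toNat,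
        (((fun j => decide (PySem.Str.pyGet? source ((iN : Int) + j) ≠ PySem.Str.pyGet? target j)) ∘
          (fun k : Nat => (0 : Int) + (k : Int))) k = true ↔
          (fun k => decide (s[iN + k]? ≠ t[k]?)) k = true) := by
      intro k _
      have h1 : (iN : Int) + (k : Int) = ((iN + k : Nat) : Int) := by push_cast; ring
      simp only [Function.comp, zero_add, h1, PySem.Str.pyGet?_natCast, ← hsdef, ← htdef]
    rw [List.countP_congr hpt, show ((t.length : Int) - 0).toNat = t.length by omega,
      pvInner t s iN (by omega), zero_add, ← hwdef]
  rw [hA]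
  -- B's side: identify the slices
  have hslice1 : PySem.List.slice s (some ((iN : Int))) (some ((iN : Int) + (t.length : Int))) = w := by
    rw [PySem.List.slice_toNat _ (by positivity) (by positivity),
      show ((iN : Int) + (t.length : Int)).toNat = iN + t.length by omega,
      Int.toNat_natCast, hwdef]
    congr 1
    omega
  rw [hslice1]
  set kN : Nat := pvLcp w t with hkNdef
  have hslice2 : PySem.List.slice s (some ((iN : Int) + (kN : Int) + 1)) (some ((iN : Int) + (t.length : Int))) =
      (s.drop (iN + kN + 1)).take ((iN + t.length) - (iN + kN + 1)) := by
    rw [PySem.List.slice_toNat _ (by positivity) (by positivity),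
      show ((iN : Int) + (kN : Int) + 1).toNat = iN + kN + 1 by omega,
      show ((iN : Int) + (t.length : Int)).toNat = iN + t.length by omega]
  have hslice3 : PySem.List.slice t (some ((kN : Int) + 1)) none = t.drop (kN + 1) := by
    rw [PySem.List.slice_from _ (by positivity),
      show ((kN : Int) + 1).toNat = kN + 1 by omega]
  rw [hslice2, hslice3]
  rw [show (((pvMism w t : Nat) : Int) < 2) ↔ pvMism w t < 2 from by exact_mod_cast Iff.rfl,
    pvCore w t hwt, ← hkNdef]
  constructor
  · rintro (hkm | hdropeq)
    · exact Or.inl (by exact_mod_cast hkm)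
    · refine Or.inr ?_
      rw [hwdef] at hdropeq
      rw [pvWindow_drop s t iN kN] at hdropeq
      rw [show ((iN + t.length) - (iN + kN + 1)) = (t.length - (kN + 1)) by omega]
      exact hdropeq
  · rintro (hkm | hsliceeq)
    · exact Or.inl (by exact_mod_cast hkm)
    · refine Or.inr ?_
      rw [hwdef, pvWindow_drop s t iN kN,
        show (t.length - (kN + 1)) = ((iN + t.length) - (iN + kN + 1)) by omega]
      exact hsliceeq
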